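-- pv_equiv track=rewrite | github.com/honzaz1234/elite | src/project_elite/update_dict/sections/update_team.py | update_info
-- ===== SOURCE A (Python) =====
-- def update_info(info_dict, list_keys):
--     for key in list(info_dict.keys()):
--         if key not in list_keys:
--             del info_dict[key]
--     for key in list_keys:
--         if key not in info_dict:
--             info_dict[key] = None
--         elif type(info_dict[key]) == str:
--             info_dict[key] = info_dict[key].strip()
--     return info_dict
-- ===== SOURCE B (Python) =====
-- def update_info(info_dict, list_keys):
--     allowed = set(list_keys)
--     result = {}
--     for key, value in info_dict.items():
--         if key in allowed:
--             result[key] = value.strip() if type(value) == str else value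
--     for key in list_keys:
--         result.setdefault(key, None)
--     info_dict.clear()
--     info_dict.update(result)
--     return info_dict
-- ===== Notes on version B (the rewrite author's own statement) =====
-- stated objective: faster
-- what changed: Rebuilds the dict constructively in one pass over items (membership tested against a set built once, stripping on the way in) and appends missing keys with setdefault, instead of A's destructive delete loop that scans list_keys for every key and a second fix-up loop; the original dict object is then refilled in place.
import Mathlib
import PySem

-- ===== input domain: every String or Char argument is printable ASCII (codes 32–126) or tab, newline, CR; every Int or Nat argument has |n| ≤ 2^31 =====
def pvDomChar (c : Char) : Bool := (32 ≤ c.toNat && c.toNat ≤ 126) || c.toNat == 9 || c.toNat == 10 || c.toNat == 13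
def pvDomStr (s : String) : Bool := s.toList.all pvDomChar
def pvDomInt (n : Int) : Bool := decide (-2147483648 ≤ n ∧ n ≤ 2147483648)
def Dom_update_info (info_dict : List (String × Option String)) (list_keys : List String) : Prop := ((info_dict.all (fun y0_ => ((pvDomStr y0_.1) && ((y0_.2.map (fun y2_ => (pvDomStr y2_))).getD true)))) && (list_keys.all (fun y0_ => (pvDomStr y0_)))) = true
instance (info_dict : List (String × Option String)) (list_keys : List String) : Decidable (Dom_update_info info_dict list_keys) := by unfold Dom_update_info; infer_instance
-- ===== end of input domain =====

-- B rebuilds the dict in one pass (set membership + strip on the way in) then appends missing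
-- keys, instead of A's destructive delete loop that scans list_keys per key; both mutate the
-- caller's dict identically, and the equivalence proved here is about the returned mapping.


-- ===== PORT A =====
def update_info (info_dict : List (String × Option String)) (list_keys : List String) : List (String × Option String) :=
  let d0 : PySem.Dict String (Option String) := PySem.Dict.ofList info_dict
  -- for key in list(info_dict.keys()): if key not in list_keys: del info_dict[key]
  let d1 := d0.keys.foldl (fun d k => if k ∉ list_keys then d.erase k else d) d0
  -- for key in list_keys: insert None if missing, else strip str values
  let d2 := list_keys.foldl (fun d k =>
      if d.contains k = false then
        d.insert k none
      else
        match d.get? k with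
        | some (some s) => d.insert k (some (PySem.Str.strip s))
        | _ => d) d1
  d2.items

-- ===== PORT B =====
-- value.strip() if type(value) == str else value
def pvStripVal (v : Option String) : Option String :=
  match v with
  | some s => some (PySem.Str.strip s)
  | none => none

def update_info_alt (info_dict : List (String × Option String)) (list_keys : List String) : List (String × Option String) :=
  let allowed := PySem.Set.ofList list_keys
  let result := (PySem.Dict.ofList info_dict).items.foldl
      (fun (r : PySem.Dict String (Option String)) p =>
        if p.1 ∈ allowed then r.insert p.1 (pvStripVal p.2) else r)
      PySem.Dict.empty
  let result2 := list_keys.foldl (fun r k => r.setdefault k none) result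
  result2.items

-- ===== PRECONDITION & SPEC =====
def Spec_update_info (info_dict : List (String × Option String)) (list_keys : List String) (out : List (String × Option String)) : Prop := out = update_info_alt info_dict list_keys
instance (info_dict : List (String × Option String)) (list_keys : List String) (out : List (String × Option String)) : Decidable (Spec_update_info info_dict list_keys out) := by unfold Spec_update_info; infer_instance

-- ===== CLAIM (what is proved, stated in full; the proofs are below) =====
def Claim_equal_update_info : Prop := ∀ (info_dict : List (String × Option String)) (list_keys : List String), Dom_update_info info_dict list_keys → Spec_update_info info_dict list_keys (update_info info_dict list_keys)

-- ===== LEMMAS AND PROOFS =====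

-- strip is idempotent
theorem pv_dropWhile_idem (p : Char → Bool) (l : List Char) :
    List.dropWhile p (List.dropWhile p l) = List.dropWhile p l := by
  induction l with
  | nil => simp
  | cons a l ih =>
    by_cases h : p a
    · simp [h, ih]
    · simp [h]

theorem pv_rstrip_rstrip (l : List Char) :
    PySem.Chars.rstrip (PySem.Chars.rstrip l) = PySem.Chars.rstrip l := by
  unfold PySem.Chars.rstrip
  rw [List.reverse_reverse, pv_dropWhile_idem]

theorem pv_lstrip_rl (l : List Char) :
    PySem.Chars.lstrip (PySem.Chars.rstrip (PySem.Chars.lstrip l)) = PySem.Chars.rstrip (PySem.Chars.lstrip l) := by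
  have hpre : PySem.Chars.rstrip (PySem.Chars.lstrip l) <+: PySem.Chars.lstrip l := by
    unfold PySem.Chars.rstrip
    rw [← List.reverse_suffix, List.reverse_reverse]
    exact List.dropWhile_suffix _
  rcases hv : PySem.Chars.rstrip (PySem.Chars.lstrip l) with _ | ⟨x, rest⟩
  · simp [PySem.Chars.lstrip]
  · rw [hv] at hpre
    have hx : (PySem.Chars.lstrip l).head? = some x := by
      rcases hpre with ⟨w, hw⟩
      rw [← hw]; rfl
    have hsp : PySem.Chars.isspace x = false := by
      have h := List.head?_dropWhile_not PySem.Chars.isspace l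
      unfold PySem.Chars.lstrip at hx
      rw [hx] at h
      exact h
    show List.dropWhile _ (x :: rest) = x :: rest
    simp [hsp]

theorem pv_chars_strip_idem (l : List Char) :
    PySem.Chars.strip (PySem.Chars.strip l) = PySem.Chars.strip l := by
  unfold PySem.Chars.strip
  rw [pv_lstrip_rl, pv_rstrip_rstrip]

theorem pv_strip_idem (s : String) : PySem.Str.strip (PySem.Str.strip s) = PySem.Str.strip s := by
  unfold PySem.Str.strip
  rw [String.toList_ofList, pv_chars_strip_idem]

-- A's first loop computes a filter of the items
theorem pv_eraseLoop (lk ks : List String) (d : PySem.Dict String (Option String)) :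
    (ks.foldl (fun d k => if k ∉ lk then d.erase k else d) d).items
      = d.items.filter (fun p => decide (p.1 ∈ lk) || decide (p.1 ∉ ks)) := by
  induction ks generalizing d with
  | nil => simp
  | cons k ks ih =>
    rw [List.foldl_cons]
    by_cases hk : k ∈ lk
    · rw [if_neg (by simp [hk]), ih]
      apply List.filter_congr
      intro p _
      by_cases hpk : p.1 = k
      · simp [hpk, hk]
      · simp [List.mem_cons, hpk]
    · rw [if_pos (by simp [hk]), ih]
      show (PySem.Dict.erase d k).items.filter _ = _
      unfold PySem.Dict.erase
      rw [List.filter_filter]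
      apply List.filter_congr
      intro p _
      by_cases hpk : p.1 = k
      · simp [hpk, hk]
      · simp [List.mem_cons, hpk]

-- B's first loop = fold of inserts over the filtered items
theorem pv_filterLoop (lk : List String) (l : List (String × Option String))
    (r : PySem.Dict String (Option String)) :
    (l.foldl (fun (r : PySem.Dict String (Option String)) p => if p.1 ∈ PySem.Set.ofList lk then r.insert p.1 (pvStripVal p.2) else r) r)
      = ((l.filter (fun p => decide (p.1 ∈ lk))).foldl (fun (r : PySem.Dict String (Option String)) p => r.insert p.1 (pvStripVal p.2)) r) := by
  induction l generalizing r with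
  | nil => simp
  | cons p l ih =>
    by_cases h : p.1 ∈ lk
    · rw [List.foldl_cons, if_pos (by simpa [PySem.Set.mem_ofList] using h),
        List.filter_cons_of_pos (by simpa using h), List.foldl_cons, ih]
    · rw [List.foldl_cons, if_neg (by simpa [PySem.Set.mem_ofList] using h),
        List.filter_cons_of_neg (by simpa using h), ih]

-- second-phase simulation: setdefault loop on the stripped dict tracks A's loop
theorem pv_phase2 (ks : List String) (d r : PySem.Dict String (Option String))
    (hnd : d.keys.Nodup)
    (hr : r.items = d.items.map (fun p => (p.1, pvStripVal p.2))) :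
    (ks.foldl (fun r k => r.setdefault k none) r).items
      = (ks.foldl (fun (d : PySem.Dict String (Option String)) k =>
          if d.contains k = false then d.insert k none
          else match d.get? k with
               | some (some s) => d.insert k (some (PySem.Str.strip s))
               | _ => d) d).items.map (fun p => (p.1, pvStripVal p.2)) := by
  induction ks generalizing d r with
  | nil => simpa using hr
  | cons k ks ih =>
    have hkeys : r.keys = d.keys := by
      show r.items.map Prod.fst = d.items.map Prod.fst
      rw [hr, List.map_map]
      rfl
    have hcont : r.contains k = d.contains k := by
      rw [PySem.Dict.contains_eq_decide_mem_keys, PySem.Dict.contains_eq_decide_mem_keys, hkeys]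
    simp only [List.foldl_cons]
    rcases hc : d.contains k with _ | _
    · -- key missing: both append (k, none)
      rw [if_pos rfl, PySem.Dict.setdefault_of_not_contains _ none (by rw [hcont, hc])]
      apply ih
      · exact PySem.Dict.nodup_keys_insert _ _ _ hnd
      · rw [PySem.Dict.items_insert_of_not_contains _ _ hc,
          PySem.Dict.items_insert_of_not_contains _ _ (by rw [hcont, hc]), hr, List.map_append]
        rfl
    · -- key present: setdefault is a no-op; A strips a string value in place
      rw [if_neg (by simp), PySem.Dict.setdefault_of_contains _ none (by rw [hcont, hc])]
      have hsome : (d.get? k).isSome := by rw [← PySem.Dict.contains_eq_isSome_get?, hc]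
      rcases hv : d.get? k with _ | v
      · rw [hv] at hsome; simp at hsome
      rcases v with _ | s
      · exact ih d r hnd hr
      · apply ih
        · exact PySem.Dict.nodup_keys_insert _ _ _ hnd
        · rw [PySem.Dict.items_insert_of_contains _ _ hc, hr, List.map_map]
          apply List.map_congr_left
          intro p hp
          by_cases hpk : p.1 = k
          · have hp2 : p.2 = some s := by
              have := PySem.Dict.get?_of_mem_items d (k := p.1) (v := p.2) (by simpa using hp) hnd
              rw [hpk, hv] at this
              simpa using this.symm
            simp [Function.comp, hpk, hp2, pvStripVal, pv_strip_idem]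
          · simp [Function.comp, hpk]

-- after A's second loop every value is strip-fixed (keys not processed were already fixed)
theorem pv_phase2_fixed (ks : List String) (d : PySem.Dict String (Option String))
    (hnd : d.keys.Nodup)
    (h : ∀ p ∈ d.items, p.1 ∈ ks ∨ pvStripVal p.2 = p.2) :
    ∀ p ∈ (ks.foldl (fun (d : PySem.Dict String (Option String)) k =>
        if d.contains k = false then d.insert k none
        else match d.get? k with
             | some (some s) => d.insert k (some (PySem.Str.strip s))
             | _ => d) d).items, pvStripVal p.2 = p.2 := by
  induction ks generalizing d with
  | nil =>
    intro p hp
    rcases h p hp with hmem | hfix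
    · simp at hmem
    · exact hfix
  | cons k ks ih =>
    simp only [List.foldl_cons]
    rcases hc : d.contains k with _ | _
    · rw [if_pos rfl]
      apply ih
      · exact PySem.Dict.nodup_keys_insert _ _ _ hnd
      · intro p hp
        rcases (PySem.Dict.mem_items_insert _ _ _ _).mp hp with hpk | ⟨hpd, hne⟩
        · right; rw [hpk]; rfl
        · rcases h p hpd with hmem | hfix
          · rcases List.mem_cons.mp hmem with h1 | h2
            · exact absurd h1 hne
            · exact Or.inl h2
          · exact Or.inr hfix
    · rw [if_neg (by simp)]
      have hsome : (d.get? k).isSome := by rw [← PySem.Dict.contains_eq_isSome_get?, hc]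
      rcases hv : d.get? k with _ | v
      · rw [hv] at hsome; simp at hsome
      rcases v with _ | s
      · apply ih d hnd
        intro p hpd
        by_cases hpk : p.1 = k
        · right
          have hp2 : p.2 = none := by
            have := PySem.Dict.get?_of_mem_items d (k := p.1) (v := p.2) (by simpa using hpd) hnd
            rw [hpk, hv] at this
            simpa using this.symm
          rw [hp2]; rfl
        · rcases h p hpd with hmem | hfix
          · rcases List.mem_cons.mp hmem with h1 | h2
            · exact absurd h1 hpk
            · exact Or.inl h2
          · exact Or.inr hfix
      · apply ih
        · exact PySem.Dict.nodup_keys_insert _ _ _ hnd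
        · intro p hp
          rcases (PySem.Dict.mem_items_insert _ _ _ _).mp hp with hpk | ⟨hpd, hne⟩
          · right; rw [hpk]; simp [pvStripVal, pv_strip_idem]
          · rcases h p hpd with hmem | hfix
            · rcases List.mem_cons.mp hmem with h1 | h2
              · exact absurd h1 hne
              · exact Or.inl h2
            · exact Or.inr hfix

-- ===== VERDICT (by name: the statement is the Claim_ definition above) =====
theorem update_info_spec : Claim_equal_update_info := by
  intro info_dict list_keys _
  show update_info info_dict list_keys = update_info_alt info_dict list_keys
  simp only [update_info, update_info_alt]
  set d0 : PySem.Dict String (Option String) := PySem.Dict.ofList info_dict with hd0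
  set d1 : PySem.Dict String (Option String) :=
    d0.keys.foldl (fun d k => if k ∉ list_keys then d.erase k else d) d0 with hd1def
  have hnd0 : (d0.items.map Prod.fst).Nodup := PySem.Dict.nodup_keys_ofList info_dict
  have hd1 : d1.items = d0.items.filter (fun p => decide (p.1 ∈ list_keys)) := by
    rw [hd1def, pv_eraseLoop]
    refine List.filter_congr ?_
    intro p hp
    have hpk : p.1 ∈ d0.keys := List.mem_map_of_mem hp
    simp [hpk]
  have hnd1 : d1.keys.Nodup := by
    show (d1.items.map Prod.fst).Nodup
    rw [hd1]
    exact (List.Sublist.map Prod.fst List.filter_sublist).nodup hnd0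
  have hB1 : (d0.items.foldl
      (fun (r : PySem.Dict String (Option String)) p =>
        if p.1 ∈ PySem.Set.ofList list_keys then r.insert p.1 (pvStripVal p.2) else r)
      PySem.Dict.empty).items = d1.items.map (fun p => (p.1, pvStripVal p.2)) := by
    rw [pv_filterLoop, PySem.Dict.items_foldl_insert_fresh _ Prod.fst (fun p => pvStripVal p.2)
      PySem.Dict.empty (fun _ _ => PySem.Dict.contains_empty _)
      ((List.Sublist.map Prod.fst List.filter_sublist).nodup hnd0), hd1]
    rfl
  rw [pv_phase2 list_keys d1 _ hnd1 hB1]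
  have hfixall : ∀ p ∈ (list_keys.foldl (fun (d : PySem.Dict String (Option String)) k =>
      if d.contains k = false then d.insert k none
      else match d.get? k with
           | some (some s) => d.insert k (some (PySem.Str.strip s))
           | _ => d) d1).items, pvStripVal p.2 = p.2 := by
    apply pv_phase2_fixed _ _ hnd1
    intro q hq
    rw [hd1] at hq
    exact Or.inl (by simpa using List.of_mem_filter hq)
  symm
  refine (List.map_congr_left ?_).trans (List.map_id _)
  intro p hp
  exact Prod.ext rfl (hfixall p hp)
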